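-- pv_equiv track=rewrite | github.com/SoutiRini/Top-20-Python-Libraries | stuff/PARSER.py | change_args_to_dict
-- ===== SOURCE A (Python) =====
-- def change_args_to_dict(string):
--     if string is None:
--         return None
--     ans = []
--     strings = string.split('\n')
--     ind = 1
--     start = 0
--     while ind <= len(strings):
--         if ind < len(strings) and strings[ind].startswith(" "):
--             ind += 1
--         else:
--             if start < ind:
--                 ans.append('\n'.join(strings[start:ind]))
--             start = ind
--             ind += 1
--     d = {}
--     for line in ans:
--         if ":" in line and len(line) > 0:
--             lines = line.split(":")
--             d[lines[0]] = lines[1].strip()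
--     return d
-- ===== SOURCE B (Python) =====
-- def _flush(d, line):
--     if ":" in line:
--         parts = line.split(":")
--         d[parts[0]] = parts[1].strip()
--
--
-- def change_args_to_dict(string):
--     if string is None:
--         return None
--     d = {}
--     first, *rest = string.split('\n')
--     cur = first
--     for line in rest:
--         if line.startswith(" "):
--             cur = cur + "\n" + line
--         else:
--             _flush(d, cur)
--             cur = line
--     _flush(d, cur)
--     return d
-- ===== Notes on version B (the rewrite author's own statement) =====
-- stated objective: simpler
-- what changed: Replaced the index-based while loop (ind/start cursors, slice-and-join per group, intermediate ans list) by a single for-loop that carries the current group as a string accumulator and flushes each completed group directly into the dict, eliminating the intermediate list and the second pass.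
import Mathlib
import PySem

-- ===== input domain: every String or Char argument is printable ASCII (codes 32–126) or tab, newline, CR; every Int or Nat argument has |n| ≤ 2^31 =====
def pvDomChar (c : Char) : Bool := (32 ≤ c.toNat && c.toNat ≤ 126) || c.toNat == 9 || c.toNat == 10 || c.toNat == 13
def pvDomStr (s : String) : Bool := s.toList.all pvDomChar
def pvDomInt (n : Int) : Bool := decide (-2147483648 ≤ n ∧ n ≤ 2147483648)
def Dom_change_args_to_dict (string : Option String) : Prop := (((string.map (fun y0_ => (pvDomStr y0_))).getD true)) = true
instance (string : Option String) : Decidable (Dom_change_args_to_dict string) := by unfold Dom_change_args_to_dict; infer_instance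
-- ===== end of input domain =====

-- B replaces A's index-based while loop over the split lines (indices ind/start plus a
-- slice-and-join per group) by a single pass with a current-group string accumulator that
-- flushes each completed group straight into the dict, removing the intermediate `ans` list.
-- Objective: simpler (same asymptotic cost).

-- ===== PORT A =====
-- the while loop: state (ind, start, ans); runs while ind <= len(strings)
def aLoop (strings : List String) (ind start : Nat) (ans : List String) : List String :=
  if ind ≤ strings.length then
    if (ind < strings.length ∧ PySem.Str.startswith ((PySem.List.pyGet? strings (ind : Int)).getD "") " " = true) then
      aLoop strings (ind + 1) start ans
    else
      aLoop strings (ind + 1) ind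
        (if start < ind then
          ans ++ [PySem.Str.join "\n" (PySem.List.slice strings (some (start : Int)) (some (ind : Int)))]
        else ans)
  else ans
  termination_by strings.length + 1 - ind
  decreasing_by all_goals omega

-- body of A's `for line in ans` dict-building loop
def aStep (d : PySem.Dict String String) (line : String) : PySem.Dict String String :=
  if PySem.Str.isIn ":" line = true ∧ PySem.Str.len line > 0 then
    let lines := (PySem.Str.split? line ":").getD []
    d.insert ((PySem.List.pyGet? lines 0).getD "") (PySem.Str.strip ((PySem.List.pyGet? lines 1).getD ""))
  else d

def change_args_to_dict (string : Option String) : Option (List (String × String)) :=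
  match string with
  | none => none
  | some s =>
    let strings := (PySem.Str.split? s "\n").getD []
    let ans := aLoop strings 1 0 []
    some ((ans.foldl aStep PySem.Dict.empty).items)

-- ===== PORT B =====
-- B's _flush helper
def bFlush (d : PySem.Dict String String) (line : String) : PySem.Dict String String :=
  if PySem.Str.isIn ":" line = true then
    let parts := (PySem.Str.split? line ":").getD []
    d.insert ((PySem.List.pyGet? parts 0).getD "") (PySem.Str.strip ((PySem.List.pyGet? parts 1).getD ""))
  else d

-- B's `for line in rest` loop with accumulators (d, cur), final flush at the end
def bLoop (d : PySem.Dict String String) (cur : String) : List String → PySem.Dict String String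
  | [] => bFlush d cur
  | l :: ls =>
    if PySem.Str.startswith l " " = true then bLoop d (cur ++ "\n" ++ l) ls
    else bLoop (bFlush d cur) l ls

def change_args_to_dict_alt (string : Option String) : Option (List (String × String)) :=
  match string with
  | none => none
  | some s =>
    let lines := (PySem.Str.split? s "\n").getD []
    some ((bLoop PySem.Dict.empty ((PySem.List.pyGet? lines 0).getD "")
            (PySem.List.slice lines (some (1 : Int)) none)).items)

-- ===== PRECONDITION & SPEC =====
def Spec_change_args_to_dict (string : Option String) (out : Option (List (String × String))) : Prop := out = change_args_to_dict_alt string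
instance (string : Option String) (out : Option (List (String × String))) : Decidable (Spec_change_args_to_dict string out) := by unfold Spec_change_args_to_dict; infer_instance

-- ===== CLAIM (what is proved, stated in full; the proofs are below) =====
def Claim_equal_change_args_to_dict : Prop := ∀ (string : Option String), Dom_change_args_to_dict string → Spec_change_args_to_dict string (change_args_to_dict string)

-- ===== LEMMAS AND PROOFS =====

-- grouping of the remaining lines, with the current group already joined into `cur`
def gj (cur : String) : List String → List String
  | [] => [cur]
  | l :: ls => if PySem.Str.startswith l " " = true then gj (cur ++ "\n" ++ l) ls else cur :: gj l ls

theorem chars_join_snoc (sep x : List Char) (grp : List (List Char)) (h : grp ≠ []) :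
    PySem.Chars.join sep (grp ++ [x]) = PySem.Chars.join sep grp ++ sep ++ x := by
  induction grp with
  | nil => exact absurd rfl h
  | cons a t ih =>
    cases t with
    | nil => simp [PySem.Chars.join_cons_cons, PySem.Chars.join_singleton]
    | cons b r =>
      have := ih (by simp)
      simp only [List.cons_append] at this ⊢
      rw [PySem.Chars.join_cons_cons, PySem.Chars.join_cons_cons, this]
      simp [List.append_assoc]

theorem str_join_snoc (x : String) (grp : List String) (h : grp ≠ []) :
    PySem.Str.join "\n" (grp ++ [x]) = PySem.Str.join "\n" grp ++ "\n" ++ x := by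
  simp only [PySem.Str.join]
  rw [List.map_append, List.map_singleton, chars_join_snoc _ _ _ (by simpa using h)]
  apply String.toList_injective
  simp

theorem str_join_singleton (x : String) : PySem.Str.join "\n" [x] = x := by
  simp only [PySem.Str.join, List.map_singleton, PySem.Chars.join_singleton]
  simp

theorem aStep_eq_bFlush (d : PySem.Dict String String) (line : String) :
    aStep d line = bFlush d line := by
  unfold aStep bFlush
  by_cases h : PySem.Str.isIn ":" line = true
  · have hlen : PySem.Str.len line > 0 := by
      rw [PySem.Str.isIn_iff_infix] at h
      rw [PySem.Str.len_eq]
      rcases h with ⟨p, q, hp⟩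
      have hne : line.toList ≠ [] := by
        intro hnil; rw [hnil] at hp; simp at hp
      cases hl : line.toList with
      | nil => exact absurd hl hne
      | cons a t => simp
    rw [if_pos ⟨h, hlen⟩, if_pos h]
  · rw [if_neg (fun hc => h hc.1), if_neg h]

theorem bLoop_eq_foldl (ls : List String) : ∀ (cur : String) (d : PySem.Dict String String),
    bLoop d cur ls = (gj cur ls).foldl aStep d := by
  induction ls with
  | nil => intro cur d; simp [bLoop, gj, aStep_eq_bFlush]
  | cons l t ih =>
    intro cur d
    by_cases hs : PySem.Str.startswith l " " = true
    · rw [bLoop, if_pos hs, gj, if_pos hs, ih]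
    · rw [bLoop, if_neg hs, gj, if_neg hs, ih]
      simp [aStep_eq_bFlush]

theorem getElem?_middle (pre grp : List String) (l : String) (ls : List String) :
    (pre ++ grp ++ l :: ls)[pre.length + grp.length]? = some l := by
  rw [List.getElem?_append_right (by simp)]
  simp

theorem slice_middle (pre grp rest : List String) :
    PySem.List.slice (pre ++ grp ++ rest) (some (pre.length : Int))
      (some ((pre.length + grp.length : Nat) : Int)) = grp := by
  rw [PySem.List.slice_natCast, List.append_assoc, List.drop_left]
  have h : pre.length + grp.length - pre.length = grp.length := by omega
  rw [h, List.take_left]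

theorem aLoop_eq (rest : List String) : ∀ (pre grp ans : List String), grp ≠ [] →
    aLoop (pre ++ grp ++ rest) (pre.length + grp.length) pre.length ans
      = ans ++ gj (PySem.Str.join "\n" grp) rest := by
  induction rest with
  | nil =>
    intro pre grp ans hg
    have hlt : pre.length < pre.length + grp.length := by
      cases grp with | nil => exact absurd rfl hg | cons a t => simp
    rw [aLoop, if_pos (by simp), if_neg (by simp), if_pos hlt]
    rw [aLoop, if_neg (by simp)]
    rw [slice_middle]
    simp [gj]
  | cons l ls ih =>
    intro pre grp ans hg
    have hlt : pre.length < pre.length + grp.length := by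
      cases grp with | nil => exact absurd rfl hg | cons a t => simp
    rw [aLoop, if_pos (by simp), PySem.List.pyGet?_natCast, getElem?_middle]
    by_cases hs : PySem.Str.startswith l " " = true
    · rw [if_pos ⟨by simp, by simpa using hs⟩]
      have h1 : pre ++ grp ++ l :: ls = pre ++ (grp ++ [l]) ++ ls := by simp
      have h2 : pre.length + grp.length + 1 = pre.length + (grp ++ [l]).length := by
        simp; omega
      rw [h1, h2, ih pre (grp ++ [l]) ans (by simp)]
      rw [str_join_snoc l grp hg]
      rw [gj, if_pos hs]
    · rw [if_neg (by intro hc; exact hs hc.2)]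
      rw [if_pos hlt, slice_middle]
      have h1 : pre ++ grp ++ l :: ls = (pre ++ grp) ++ [l] ++ ls := by simp
      have h2 : pre.length + grp.length + 1 = (pre ++ grp).length + ([l] : List String).length := by
        simp
      have h3 : pre.length + grp.length = (pre ++ grp).length := by simp
      rw [h1, h2, h3, ih (pre ++ grp) [l] _ (by simp)]
      rw [str_join_singleton]
      rw [gj, if_neg hs]
      simp

-- ===== VERDICT (by name: the statement is the Claim_ definition above) =====
theorem change_args_to_dict_spec : Claim_equal_change_args_to_dict := by
  intro string _
  unfold Spec_change_args_to_dict
  cases string with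
  | none => rfl
  | some s =>
    show change_args_to_dict (some s) = change_args_to_dict_alt (some s)
    unfold change_args_to_dict change_args_to_dict_alt
    cases hl : (PySem.Str.split? s "\n").getD [] with
    | nil =>
      simp only [hl]
      rw [aLoop, if_neg (by simp)]
      simp [bLoop, bFlush, PySem.List.slice, PySem.List.pyGet?]
      decide
    | cons c rest =>
      have hA : aLoop (c :: rest) 1 0 [] = gj c rest := by
        have := aLoop_eq rest [] [c] [] (by simp)
        simpa [str_join_singleton] using this
      simp only [hl, hA, bLoop_eq_foldl]
      have hsl : PySem.List.slice (c :: rest) (some (1 : Int)) none = rest := by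
        simpa using PySem.List.slice_from_natCast (c :: rest) 1
      rw [hsl]
      simp [PySem.List.pyGet?, PySem.List.pyIdx?]
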